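-- pv_equiv track=rewrite | github.com/Wonyoungpark/TIL | Python/Programmers/마법의엘리베이터.py | solution
-- ===== SOURCE A (Python) =====
-- import math
--
-- def solution(storey):
--     answer = 0
--
--     while storey:
--         num = storey%10
--         storey = math.floor(storey/10)
--
--         if num<5:
--             answer += num
--         elif num>5:
--             answer += (10-num)
--             storey += 1
--         else:
--             if (storey%10) < 5: answer += num
--             else:
--                 answer += (10-num)
--                 storey += 1
--     return answer
-- ===== SOURCE B (Python) =====
-- def solution(storey):
--     # Recursive min over both branches: pay the last digit and round down,
--     # or pay (ten - digit) and round up with a carry; base case: a single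
--     # remaining digit, where carrying up leaves one floor to go down.
--     if storey < 10:
--         return min(storey, 11 - storey)
--     d = storey % 10
--     return min(d + solution(storey // 10), (10 - d) + solution(storey // 10 + 1))
-- ===== Notes on version B (the rewrite author's own statement) =====
-- stated objective: alternative
-- what changed: Replaces A's iterative greedy digit loop (which branches on the digit and peeks at the next digit to break ties) by a direct recursion taking the minimum of both the round-down and the carry-up branch, with a closed-form base case for a single remaining digit.
-- outside the precondition, e.g. on solution(-1): A returns 1, B returns -1; on solution(-2): A returns 2, B returns -2
import Mathlib
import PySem

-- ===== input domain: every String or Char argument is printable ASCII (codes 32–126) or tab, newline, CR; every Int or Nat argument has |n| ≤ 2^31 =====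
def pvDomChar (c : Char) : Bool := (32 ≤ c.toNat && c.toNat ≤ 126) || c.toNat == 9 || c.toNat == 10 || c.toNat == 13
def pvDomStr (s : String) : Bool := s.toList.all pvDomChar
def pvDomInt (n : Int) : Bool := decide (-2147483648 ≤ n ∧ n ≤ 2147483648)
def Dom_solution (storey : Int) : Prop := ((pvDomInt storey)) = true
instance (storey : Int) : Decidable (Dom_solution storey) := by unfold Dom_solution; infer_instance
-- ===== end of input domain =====

-- B replaces A's greedy digit loop by a direct min-of-both-branches recursion (alternative
-- decomposition, same exact values on storey ≥ 0).

-- termination lemmas for the ports (cited by name in decreasing_by)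
theorem pv_decA_down (storey : Int) (h0 : ¬ storey = 0)
    (h : PySem.Int.mod storey 10 ≤ 5) :
    (PySem.Int.floordiv storey 10).natAbs < storey.natAbs := by
  rw [PySem.Int.floordiv_eq_ediv_of_pos (by norm_num : (0:Int) < 10)]
  rw [PySem.Int.mod_eq_emod_of_pos (by norm_num : (0:Int) < 10)] at h
  omega

theorem pv_decA_up (storey : Int) (_h0 : ¬ storey = 0)
    (h : 5 ≤ PySem.Int.mod storey 10) :
    (PySem.Int.floordiv storey 10 + 1).natAbs < storey.natAbs := by
  rw [PySem.Int.floordiv_eq_ediv_of_pos (by norm_num : (0:Int) < 10)]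
  rw [PySem.Int.mod_eq_emod_of_pos (by norm_num : (0:Int) < 10)] at h
  omega

theorem pv_decB_down (storey : Int) (h : ¬ storey < 10) :
    (PySem.Int.floordiv storey 10).toNat < storey.toNat := by
  rw [PySem.Int.floordiv_eq_ediv_of_pos (by norm_num : (0:Int) < 10)]; omega

theorem pv_decB_up (storey : Int) (h : ¬ storey < 10) :
    (PySem.Int.floordiv storey 10 + 1).toNat < storey.toNat := by
  rw [PySem.Int.floordiv_eq_ediv_of_pos (by norm_num : (0:Int) < 10)]; omega

-- ===== PORT A =====
-- A's while-loop, state (storey, answer).  math.floor(storey/10) is ported as floor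
-- division PySem.Int.floordiv: exact here since |storey| ≤ 2^31 < 2^53 makes the float
-- division storey/10 exact enough for floor to agree with mathematical floor.
def solutionLoop (storey answer : Int) : Int :=
  if h0 : storey = 0 then answer
  else
    let num := PySem.Int.mod storey 10
    let s := PySem.Int.floordiv storey 10
    if num < 5 then solutionLoop s (answer + num)
    else if num > 5 then solutionLoop (s + 1) (answer + (10 - num))
    else if PySem.Int.mod s 10 < 5 then solutionLoop s (answer + num)
    else solutionLoop (s + 1) (answer + (10 - num))
termination_by storey.natAbs
decreasing_by
  · exact pv_decA_down storey h0 (le_of_lt ‹num < 5›)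
  · exact pv_decA_up storey h0 (le_of_lt ‹num > 5›)
  · exact pv_decA_down storey h0 (not_lt.mp ‹¬ num > 5›)
  · exact pv_decA_up storey h0 (not_lt.mp ‹¬ num < 5›)

def solution (storey : Int) : Int := solutionLoop storey 0

-- ===== PORT B =====
def solution_alt (storey : Int) : Int :=
  if storey < 10 then min storey (11 - storey)
  else
    let d := PySem.Int.mod storey 10
    min (d + solution_alt (PySem.Int.floordiv storey 10))
        ((10 - d) + solution_alt (PySem.Int.floordiv storey 10 + 1))
termination_by storey.toNat
decreasing_by
  · exact pv_decB_down storey ‹¬ storey < 10›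
  · exact pv_decB_up storey ‹¬ storey < 10›

-- ===== PRECONDITION & SPEC =====
-- Pre_ restricts to the problem's natural domain, non-negative storey (the puzzle only
-- defines costs for positive floors).  A still returns on negative storey, but a cost of
-- a negative floor is specified by nobody and A's value there is an accident of its
-- float-floor digit arithmetic; B's value there is as defensible as A's.
def Pre_solution (storey : Int) : Prop := 0 ≤ storey
instance (storey : Int) : Decidable (Pre_solution storey) := by unfold Pre_solution; infer_instance
def pvWitness_solution : Int := 2554
def Spec_solution (storey : Int) (out : Int) : Prop := out = solution_alt storey
instance (storey : Int) (out : Int) : Decidable (Spec_solution storey out) := by unfold Spec_solution; infer_instance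

-- ===== CLAIM (what is proved, stated in full; the proofs are below) =====
def Claim_equal_solution : Prop := ∀ (storey : Int), Dom_solution storey → Pre_solution storey → Spec_solution storey (solution storey)

-- ===== LEMMAS AND PROOFS =====

theorem pv_fd10 (n : Int) : PySem.Int.floordiv n 10 = n / 10 :=
  PySem.Int.floordiv_eq_ediv_of_pos (by norm_num)

theorem pv_md10 (n : Int) : PySem.Int.mod n 10 = n % 10 :=
  PySem.Int.mod_eq_emod_of_pos (by norm_num)

theorem alt_small (n : Int) (h : n < 10) : solution_alt n = min n (11 - n) := by
  rw [solution_alt, if_pos h]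

theorem alt_big (n : Int) (h : 10 ≤ n) :
    solution_alt n =
      min (n % 10 + solution_alt (n / 10)) ((10 - n % 10) + solution_alt (n / 10 + 1)) := by
  rw [solution_alt, if_neg (by omega), pv_fd10, pv_md10]

-- |solution_alt (n+1) − solution_alt n| ≤ 1 for n ≥ 0 (strong induction).
theorem alt_lip : ∀ (k : Nat) (n : Int), 0 ≤ n → n < (k : Int) →
    solution_alt (n + 1) ≤ solution_alt n + 1 ∧ solution_alt n ≤ solution_alt (n + 1) + 1 := by
  intro k
  induction k with
  | zero => intro n h0 hk; exact absurd hk (by omega)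
  | succ k ih =>
    intro n h0 hk
    by_cases hs : n + 1 < 10
    · rw [alt_small n (by omega), alt_small (n + 1) hs]
      simp only [min_def]; split_ifs <;> omega
    · by_cases h9 : n < 10
      · -- n = 9
        have hn : n = 9 := by omega
        subst hn
        have f9 : solution_alt 9 = 2 := by
          rw [alt_small 9 (by norm_num)]; norm_num [min_def]
        have f10 : solution_alt 10 = 1 := by
          rw [alt_big 10 (by norm_num)]
          norm_num [alt_small 1 (by norm_num : (1:Int) < 10),
                    alt_small 2 (by norm_num : (2:Int) < 10), min_def]
        constructor <;> simp [f9, show (9:Int) + 1 = 10 from rfl, f10]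
      · -- n ≥ 10
        have h10 : (10:Int) ≤ n := by omega
        by_cases hd : n % 10 ≤ 8
        · have e1 : (n + 1) % 10 = n % 10 + 1 := by omega
          have e2 : (n + 1) / 10 = n / 10 := by omega
          rw [alt_big n h10, alt_big (n + 1) (by omega), e1, e2]
          simp only [min_def]; split_ifs <;> omega
        · -- last digit 9: carry into the quotient
          have hd9 : n % 10 = 9 := by omega
          have e1 : (n + 1) % 10 = 0 := by omega
          have e2 : (n + 1) / 10 = n / 10 + 1 := by omega
          have hq1 := ih (n / 10) (by omega) (by omega)
          have hq2 := ih (n / 10 + 1) (by omega) (by omega)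
          rw [alt_big n h10, alt_big (n + 1) (by omega), e1, e2]
          simp only [min_def] at *; split_ifs at * <;> omega

-- if the last digit of q is < 5, rounding q up cannot lower the cost
theorem alt_mono_lt5 (q : Int) (h0 : 0 ≤ q) (hd : q % 10 < 5) :
    solution_alt q ≤ solution_alt (q + 1) := by
  by_cases hs : q < 10
  · have : q % 10 = q := by omega
    rw [alt_small q hs, alt_small (q + 1) (by omega)]
    simp only [min_def]; split_ifs <;> omega
  · have h10 : (10:Int) ≤ q := by omega
    have hl := alt_lip (q / 10 + 1).toNat (q / 10) (by omega) (by omega)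
    have e1 : (q + 1) % 10 = q % 10 + 1 := by omega
    have e2 : (q + 1) / 10 = q / 10 := by omega
    rw [alt_big q h10, alt_big (q + 1) (by omega), e1, e2]
    simp only [min_def] at *; split_ifs at * <;> omega

-- if the last digit of q is ≥ 5, rounding q up cannot raise the cost
theorem alt_mono_ge5 (q : Int) (h0 : 0 ≤ q) (hd : 5 ≤ q % 10) :
    solution_alt (q + 1) ≤ solution_alt q := by
  by_cases hs : q < 10
  · by_cases hs1 : q + 1 < 10
    · have : q % 10 = q := by omega
      rw [alt_small q hs, alt_small (q + 1) hs1]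
      simp only [min_def]; split_ifs <;> omega
    · -- q = 9
      have hq : q = 9 := by omega
      subst hq
      have f9 : solution_alt 9 = 2 := by
        rw [alt_small 9 (by norm_num)]; norm_num [min_def]
      have f10 : solution_alt 10 = 1 := by
        rw [alt_big 10 (by norm_num)]
        norm_num [alt_small 1 (by norm_num : (1:Int) < 10),
                  alt_small 2 (by norm_num : (2:Int) < 10), min_def]
      simp [show (9:Int) + 1 = 10 from rfl, f9, f10]
  · have h10 : (10:Int) ≤ q := by omega
    have hl := alt_lip (q / 10 + 1).toNat (q / 10) (by omega) (by omega)
    by_cases hd8 : q % 10 ≤ 8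
    · have e1 : (q + 1) % 10 = q % 10 + 1 := by omega
      have e2 : (q + 1) / 10 = q / 10 := by omega
      rw [alt_big q h10, alt_big (q + 1) (by omega), e1, e2]
      simp only [min_def] at *; split_ifs at * <;> omega
    · have hd9 : q % 10 = 9 := by omega
      have e1 : (q + 1) % 10 = 0 := by omega
      have e2 : (q + 1) / 10 = q / 10 + 1 := by omega
      rw [alt_big q h10, alt_big (q + 1) (by omega), e1, e2]
      simp only [min_def] at *; split_ifs at * <;> omega

theorem alt_zero : solution_alt 0 = 0 := by
  rw [alt_small 0 (by norm_num)]; norm_num [min_def]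

theorem alt_one : solution_alt 1 = 1 := by
  rw [alt_small 1 (by norm_num)]; norm_num [min_def]

-- A's loop computes answer + solution_alt storey (strong induction on storey)
theorem loop_eq : ∀ (k : Nat) (n a : Int), 0 ≤ n → n < (k : Int) →
    solutionLoop n a = a + solution_alt n := by
  intro k
  induction k with
  | zero => intro n a h0 hk; exact absurd hk (by omega)
  | succ k ih =>
    intro n a h0 hk
    by_cases hz : n = 0
    · subst hz; rw [solutionLoop, dif_pos rfl, alt_zero]; ring
    · rw [solutionLoop, dif_neg hz]
      simp only [pv_fd10, pv_md10]
      have hq0 : 0 ≤ n / 10 := by omega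
      have hqlt : n / 10 < (k : Int) := by omega
      by_cases h1 : n % 10 < 5
      · rw [if_pos h1, ih (n / 10) _ hq0 hqlt]
        by_cases hs : n < 10
        · have : n % 10 = n := by omega
          have : n / 10 = 0 := by omega
          rw [this, alt_zero, alt_small n hs]
          simp only [min_def]; split_ifs <;> omega
        · have hl := alt_lip (n / 10 + 1).toNat (n / 10) (by omega) (by omega)
          rw [alt_big n (by omega)]
          simp only [min_def] at *; split_ifs at * <;> omega
      · rw [if_neg h1]
        by_cases h2 : 5 < n % 10
        · rw [if_pos h2, ih (n / 10 + 1) _ (by omega) (by omega)]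
          by_cases hs : n < 10
          · have : n % 10 = n := by omega
            have : n / 10 = 0 := by omega
            rw [this, show (0:Int) + 1 = 1 from rfl, alt_one, alt_small n hs]
            simp only [min_def]; split_ifs <;> omega
          · have hl := alt_lip (n / 10 + 1).toNat (n / 10) (by omega) (by omega)
            rw [alt_big n (by omega)]
            simp only [min_def] at *; split_ifs at * <;> omega
        · -- n % 10 = 5: tie broken by the next digit
          rw [if_neg h2]
          have h5 : n % 10 = 5 := by omega
          by_cases h3 : (n / 10) % 10 < 5
          · rw [if_pos h3, ih (n / 10) _ hq0 hqlt]
            by_cases hs : n < 10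
            · have hn5 : n = 5 := by omega
              subst hn5
              norm_num [alt_zero, alt_small 5 (by norm_num : (5:Int) < 10), min_def]
            · have hm := alt_mono_lt5 (n / 10) hq0 h3
              rw [alt_big n (by omega)]
              simp only [min_def] at *; split_ifs at * <;> omega
          · rw [if_neg h3, ih (n / 10 + 1) _ (by omega) (by omega)]
            have hs : ¬ n < 10 := by omega
            have hm := alt_mono_ge5 (n / 10) hq0 (by omega)
            rw [alt_big n (by omega)]
            simp only [min_def] at *; split_ifs at * <;> omega

-- ===== VERDICT (by name: the statement is the Claim_ definition above) =====
theorem solution_spec : Claim_equal_solution := by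
  intro storey _ hpre
  unfold Spec_solution solution
  rw [loop_eq (storey.toNat + 1) storey 0 hpre (by omega)]
  ring
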